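-- pv_equiv track=rewrite | github.com/AlvaroSantamariaAnton/Entrega_Final | planificador_rutinas.py | calcular_tiempo_dia
-- ===== SOURCE A (Python) =====
-- def calcular_tiempo_dia(ejercicios_dia, descanso_por_zona, tiempo_por_serie=2):
--     """
--     Calcula el tiempo total de un día de entrenamiento.
--
--     Tiempo total = (Total de series * tiempo_por_serie) + sumatorio de (descanso_por_zona[grupo] * series_de_grupo)
--
--     Así, cada grupo añade descanso en función del número de series que tenga asignadas.
--     """
--     total_series = sum(ser for _, _, ser in ejercicios_dia)
--     tiempo_series = total_series * tiempo_por_serie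
--     series_por_grupo = {}
--     for _, grupo, ser in ejercicios_dia:
--         series_por_grupo[grupo] = series_por_grupo.get(grupo, 0) + ser
--
--     # Descanso total sumando (descanso del grupo * número de series del grupo)
--     tiempo_descanso = sum(descanso_por_zona[grupo] * series_por_grupo[grupo] for grupo in series_por_grupo)
--     return tiempo_series + tiempo_descanso
-- ===== SOURCE B (Python) =====
-- def calcular_tiempo_dia(ejercicios_dia, descanso_por_zona, tiempo_por_serie=2):
--     """Single linear pass: each exercise contributes its series time plus its
--     group's rest time, no intermediate per-group dictionary."""
--     total = 0
--     for _, grupo, ser in ejercicios_dia: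
--         total += ser * tiempo_por_serie + descanso_por_zona[grupo] * ser
--     return total
-- ===== Notes on version B (the rewrite author's own statement) =====
-- stated objective: simpler
-- what changed: B fuses A's three passes (total-series sum, per-group dict build, grouped rest sum) into one loop over ejercicios_dia adding ser*tiempo_por_serie + descanso_por_zona[grupo]*ser per exercise, dropping the series_por_grupo dict entirely.
import Mathlib
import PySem

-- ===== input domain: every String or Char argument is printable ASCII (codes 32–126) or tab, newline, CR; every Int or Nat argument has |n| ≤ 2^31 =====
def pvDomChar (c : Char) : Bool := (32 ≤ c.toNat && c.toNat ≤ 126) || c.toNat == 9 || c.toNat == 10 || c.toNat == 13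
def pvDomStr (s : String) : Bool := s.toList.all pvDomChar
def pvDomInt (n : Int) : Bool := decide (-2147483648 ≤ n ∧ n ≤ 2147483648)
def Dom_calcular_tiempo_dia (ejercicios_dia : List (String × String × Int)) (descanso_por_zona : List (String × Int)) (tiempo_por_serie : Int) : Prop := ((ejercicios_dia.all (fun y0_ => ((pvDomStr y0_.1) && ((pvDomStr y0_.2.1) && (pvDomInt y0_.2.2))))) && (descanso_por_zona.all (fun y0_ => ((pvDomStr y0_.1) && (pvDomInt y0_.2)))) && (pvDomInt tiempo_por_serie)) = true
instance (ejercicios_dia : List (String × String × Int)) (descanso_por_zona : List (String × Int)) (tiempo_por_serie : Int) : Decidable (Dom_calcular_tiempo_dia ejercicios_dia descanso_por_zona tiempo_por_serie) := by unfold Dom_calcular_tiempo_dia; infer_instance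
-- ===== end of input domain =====

-- B fuses A's three passes into one loop over ejercicios_dia (no per-group dict); equal return values proved on Pre_ (every grupo present in descanso_por_zona).


-- ===== PORT A =====
def calcular_tiempo_dia (ejercicios_dia : List (String × String × Int)) (descanso_por_zona : List (String × Int)) (tiempo_por_serie : Int) : Int :=
  let total_series : Int := ejercicios_dia.foldl (fun acc x => acc + x.2.2) 0
  let tiempo_series : Int := total_series * tiempo_por_serie
  let series_por_grupo : PySem.Dict String Int :=
    ejercicios_dia.foldl (fun d x => d.modify x.2.1 0 (· + x.2.2)) PySem.Dict.empty
  let dz : PySem.Dict String Int := PySem.Dict.ofList descanso_por_zona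
  -- descanso_por_zona[grupo] raises KeyError when absent; Pre_ excludes that, getD 0 is unreachable on Pre_
  let tiempo_descanso : Int :=
    series_por_grupo.keys.foldl (fun acc grupo => acc + dz.getD grupo 0 * series_por_grupo.getD grupo 0) 0
  tiempo_series + tiempo_descanso

-- ===== PORT B =====
def calcular_tiempo_dia_alt (ejercicios_dia : List (String × String × Int)) (descanso_por_zona : List (String × Int)) (tiempo_por_serie : Int) : Int :=
  let dz : PySem.Dict String Int := PySem.Dict.ofList descanso_por_zona
  -- descanso_por_zona[grupo] raises KeyError when absent; Pre_ excludes that, getD 0 is unreachable on Pre_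
  ejercicios_dia.foldl (fun total x => total + (x.2.2 * tiempo_por_serie + dz.getD x.2.1 0 * x.2.2)) 0

-- ===== PRECONDITION & SPEC =====
-- Pre_ excludes exactly the inputs where some exercise's grupo is missing from descanso_por_zona: there A (and B) raise KeyError.
def Pre_calcular_tiempo_dia (ejercicios_dia : List (String × String × Int)) (descanso_por_zona : List (String × Int)) (tiempo_por_serie : Int) : Prop :=
  ∀ x ∈ ejercicios_dia, x.2.1 ∈ descanso_por_zona.map Prod.fst
instance (ejercicios_dia : List (String × String × Int)) (descanso_por_zona : List (String × Int)) (tiempo_por_serie : Int) : Decidable (Pre_calcular_tiempo_dia ejercicios_dia descanso_por_zona tiempo_por_serie) := by unfold Pre_calcular_tiempo_dia; infer_instance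

def pvWitness_calcular_tiempo_dia : (List (String × String × Int)) × (List (String × Int)) × Int :=
  ([("press", "pecho", 3), ("remo", "espalda", 2)], [("pecho", 1), ("espalda", 4)], 2)

def Spec_calcular_tiempo_dia (ejercicios_dia : List (String × String × Int)) (descanso_por_zona : List (String × Int)) (tiempo_por_serie : Int) (out : Int) : Prop := out = calcular_tiempo_dia_alt ejercicios_dia descanso_por_zona tiempo_por_serie
instance (ejercicios_dia : List (String × String × Int)) (descanso_por_zona : List (String × Int)) (tiempo_por_serie : Int) (out : Int) : Decidable (Spec_calcular_tiempo_dia ejercicios_dia descanso_por_zona tiempo_por_serie out) := by unfold Spec_calcular_tiempo_dia; infer_instance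

-- ===== CLAIM (what is proved, stated in full; the proofs are below) =====
def Claim_equal_calcular_tiempo_dia : Prop := ∀ (ejercicios_dia : List (String × String × Int)) (descanso_por_zona : List (String × Int)) (tiempo_por_serie : Int), Dom_calcular_tiempo_dia ejercicios_dia descanso_por_zona tiempo_por_serie → Pre_calcular_tiempo_dia ejercicios_dia descanso_por_zona tiempo_por_serie → Spec_calcular_tiempo_dia ejercicios_dia descanso_por_zona tiempo_por_serie (calcular_tiempo_dia ejercicios_dia descanso_por_zona tiempo_por_serie)

-- ===== LEMMAS AND PROOFS =====

-- updating one list element's value adds its delta to the mapped sum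
theorem pv_sum_map_update {ks : List String} (hnd : ks.Nodup) {g : String} (hg : g ∈ ks)
    (h h' : String → Int) (c : Int) (hne : ∀ a, a ≠ g → h' a = h a) (heq : h' g = h g + c) :
    (ks.map h').sum = (ks.map h).sum + c := by
  induction ks with
  | nil => cases hg
  | cons a ks ih =>
    rcases List.nodup_cons.mp hnd with ⟨ha, hnd'⟩
    by_cases hag : a = g
    · subst hag
      have : ks.map h' = ks.map h := List.map_congr_left (fun b hb => hne b (fun e => ha (e ▸ hb)))
      simp [this, heq]; ring
    · have hg' : g ∈ ks := (List.mem_cons.mp hg).resolve_left (fun h1 => hag h1.symm)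
      simp [hne a hag, ih hnd' hg']
      ring

-- the grouped weighted sum over the dict built by A's loop equals the per-exercise weighted sum
theorem pv_group_sum (f : String → Int) (e : List (String × String × Int)) (d : PySem.Dict String Int)
    (hnd : d.keys.Nodup) :
    ((e.foldl (fun d x => d.modify x.2.1 0 (· + x.2.2)) d).keys.map
        (fun g => f g * (e.foldl (fun d x => d.modify x.2.1 0 (· + x.2.2)) d).getD g 0)).sum
      = (d.keys.map (fun g => f g * d.getD g 0)).sum + (e.map (fun x => f x.2.1 * x.2.2)).sum := by
  induction e generalizing d with
  | nil => simp
  | cons x e ih =>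
    have hnd' : (d.modify x.2.1 0 (· + x.2.2)).keys.Nodup := by
      have := PySem.Dict.nodup_keys_foldl_modify_key [x] (fun y => y.2.1) 0 (fun _ y => (· + y.2.2)) d hnd
      simpa using this
    rw [List.foldl_cons, ih _ hnd']
    have hstep : ((d.modify x.2.1 0 (· + x.2.2)).keys.map
        (fun g => f g * (d.modify x.2.1 0 (· + x.2.2)).getD g 0)).sum
        = (d.keys.map (fun g => f g * d.getD g 0)).sum + f x.2.1 * x.2.2 := by
      by_cases hc : d.contains x.2.1 = true
      · have hk : (d.modify x.2.1 0 (· + x.2.2)).keys = d.keys := by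
          rw [PySem.Dict.keys_modify, PySem.Dict.keys_insert_of_contains _ _ hc]
        rw [hk]
        refine pv_sum_map_update hnd ((PySem.Dict.contains_iff_mem_keys d x.2.1).mp hc)
          (fun g => f g * d.getD g 0) (fun g => f g * (d.modify x.2.1 0 (· + x.2.2)).getD g 0)
          (f x.2.1 * x.2.2) ?_ ?_
        · intro a hag; simp only [PySem.Dict.getD_modify]; simp [hag]
        · simp only [PySem.Dict.getD_modify_self]; ring
      · have hc' : d.contains x.2.1 = false := by simpa using hc
        have hk : (d.modify x.2.1 0 (· + x.2.2)).keys = d.keys ++ [x.2.1] := by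
          rw [PySem.Dict.keys_modify, PySem.Dict.keys_insert_of_not_contains _ _ hc']
        have hx : x.2.1 ∉ d.keys := fun hm => by
          rw [(PySem.Dict.contains_iff_mem_keys d x.2.1).mpr hm] at hc'; cases hc'
        rw [hk, List.map_append, List.sum_append]
        have h1 : d.keys.map (fun g => f g * (d.modify x.2.1 0 (· + x.2.2)).getD g 0)
            = d.keys.map (fun g => f g * d.getD g 0) := by
          refine List.map_congr_left (fun g hg => ?_)
          simp only [PySem.Dict.getD_modify]
          rw [if_neg (show ¬ g = x.2.1 from fun e' => hx (e' ▸ hg))]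
        rw [h1]
        simp [PySem.Dict.getD_modify_self, PySem.Dict.getD_of_not_contains d 0 hc']
    rw [hstep]
    simp
    ring
  
-- combining the series-time sum and the rest sum into one per-exercise sum
theorem pv_sums_combine (f : String → Int) (t : Int) (e : List (String × String × Int)) :
    (e.map (fun x => x.2.2)).sum * t + (e.map (fun x => f x.2.1 * x.2.2)).sum
      = (e.map (fun x => x.2.2 * t + f x.2.1 * x.2.2)).sum := by
  induction e with
  | nil => simp
  | cons x e ih => simp [← ih]; ring

-- ===== VERDICT (by name: the statement is the Claim_ definition above) =====
theorem calcular_tiempo_dia_spec : Claim_equal_calcular_tiempo_dia := by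
  intro e dz t _ _
  unfold Spec_calcular_tiempo_dia calcular_tiempo_dia calcular_tiempo_dia_alt
  simp only [PySem.List.foldl_add]
  rw [pv_group_sum (fun g => (PySem.Dict.ofList dz).getD g 0) e PySem.Dict.empty PySem.Dict.nodup_keys_empty]
  simp [pv_sums_combine (fun g => (PySem.Dict.ofList dz).getD g 0) t e]
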